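-- pv_equiv track=rewrite | github.com/robertpmatthews/ValorBot | Main_Functions.py | numerical_ranks
-- ===== SOURCE A (Python) =====
-- def numerical_ranks(players):
--     players_numerical = {}
--     for name, ranks in players.items():
--         tempnumericalrank = 0
--         if ranks[0] == 'Challenger 1' or ranks[0] == 'Grandmaster 1' or ranks[0] == 'Master 1':
--             tempnumericalrank = 2525 + ranks[1]
--         if ranks[0] == 'Diamond 1':
--             tempnumericalrank = 2420 + ranks[1]
--         if ranks[0] == 'Diamond 2':
--             tempnumericalrank = 2315 + ranks[1]
--         if ranks[0] == 'Diamond 3':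
--             tempnumericalrank = 2210 + ranks[1]
--         if ranks[0] == 'Diamond 4':
--             tempnumericalrank = 2105 + ranks[1]
--         if ranks[0] == 'Platinum 1':
--             tempnumericalrank = 2000 + ranks[1]
--         if ranks[0] == 'Platinum 2':
--             tempnumericalrank = 1895 + ranks[1]
--         if ranks[0] == 'Platinum 3':
--             tempnumericalrank = 1790 + ranks[1]
--         if ranks[0] == 'Platinum 4':
--             tempnumericalrank = 1685 + ranks[1]
--         if ranks[0] == 'Gold 1':
--             tempnumericalrank = 1580 + ranks[1]
--         if ranks[0] == 'Gold 2':
--             tempnumericalrank = 1475 + ranks[1]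
--         if ranks[0] == 'Gold 3':
--             tempnumericalrank = 1370 + ranks[1]
--         if ranks[0] == 'Gold 4':
--             tempnumericalrank = 1265 + ranks[1]
--         if ranks[0] == 'Silver 1':
--             tempnumericalrank = 1160 + ranks[1]
--         if ranks[0] == 'Silver 2':
--             tempnumericalrank = 1055 + ranks[1]
--         if ranks[0] == 'Silver 3':
--             tempnumericalrank = 950 + ranks[1]
--         if ranks[0] == 'Silver 4':
--             tempnumericalrank = 845 + ranks[1]
--         if ranks[0] == 'Bronze 1':
--             tempnumericalrank = 740 + ranks[1]
--         if ranks[0] == 'Bronze 2':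
--             tempnumericalrank = 635 + ranks[1]
--         if ranks[0] == 'Bronze 3':
--             tempnumericalrank = 530 + ranks[1]
--         if ranks[0] == 'Bronze 4':
--             tempnumericalrank = 425 + ranks[1]
--         if ranks[0] == 'Iron 1':
--             tempnumericalrank = 320 + ranks[1]
--         if ranks[0] == 'Iron 2':
--             tempnumericalrank = 215 + ranks[1]
--         if ranks[0] == 'Iron 3':
--             tempnumericalrank = 110 + ranks[1]
--         if ranks[0] == 'Iron 4':
--             tempnumericalrank = 5 + ranks[1]
--         players_numerical[name] = tempnumericalrank
--     return players_numerical
-- ===== SOURCE B (Python) =====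
-- # Computes the rank arithmetically from the parsed label (tier name + division digit)
-- # instead of comparing against 25 hard-coded label/value pairs.
-- _TIERS = ['Iron', 'Bronze', 'Silver', 'Gold', 'Platinum', 'Diamond']
-- _APEX = ['Master', 'Grandmaster', 'Challenger']
--
-- def numerical_ranks(players):
--     players_numerical = {}
--     for name, ranks in players.items():
--         label = ranks[0]
--         off = ranks[1]
--         v = 0
--         if len(label) >= 2 and label[-2] == ' ' and label[-1] in ('1', '2', '3', '4'):
--             tier = label[:-2]
--             d = ord(label[-1]) - 48
--             if tier in _TIERS:
--                 v = 5 + 105 * (4 * _TIERS.index(tier) + (4 - d)) + off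
--             elif d == 1 and tier in _APEX:
--                 v = 2525 + off
--         players_numerical[name] = v
--     return players_numerical
-- ===== Notes on version B (the rewrite author's own statement) =====
-- stated objective: alternative
-- what changed: Instead of comparing the label against 25 hard-coded label/value pairs, B parses the label into a tier name and a division digit and computes the rank arithmetically (5 + 105 * (4*tier_index + (4 - division)) + offset; apex tiers at division 1 give 2525), 0 when the label does not parse as a valid rank.
import Mathlib
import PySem

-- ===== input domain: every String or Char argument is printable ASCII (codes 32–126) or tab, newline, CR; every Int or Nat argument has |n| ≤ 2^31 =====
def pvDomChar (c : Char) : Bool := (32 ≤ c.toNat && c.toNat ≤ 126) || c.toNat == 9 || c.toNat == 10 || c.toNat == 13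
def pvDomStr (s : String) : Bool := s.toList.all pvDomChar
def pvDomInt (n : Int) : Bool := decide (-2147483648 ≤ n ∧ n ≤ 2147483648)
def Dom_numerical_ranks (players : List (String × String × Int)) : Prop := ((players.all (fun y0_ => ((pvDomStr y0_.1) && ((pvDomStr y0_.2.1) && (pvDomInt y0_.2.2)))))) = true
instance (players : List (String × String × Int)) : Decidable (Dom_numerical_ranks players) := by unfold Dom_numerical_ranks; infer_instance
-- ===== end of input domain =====

-- B parses the label into tier name + division digit and computes the rank arithmetically,
-- instead of A's 25-branch comparison cascade (alternative decomposition, not claimed faster).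

-- ===== PORT A =====
-- the per-player cascade of Python ifs, each overwriting tempnumericalrank
def pvRankA (r : String) (o : Int) : Int :=
  let t : Int := 0
  let t := if r = "Challenger 1" ∨ r = "Grandmaster 1" ∨ r = "Master 1" then 2525 + o else t
  let t := if r = "Diamond 1" then 2420 + o else t
  let t := if r = "Diamond 2" then 2315 + o else t
  let t := if r = "Diamond 3" then 2210 + o else t
  let t := if r = "Diamond 4" then 2105 + o else t
  let t := if r = "Platinum 1" then 2000 + o else t
  let t := if r = "Platinum 2" then 1895 + o else t
  let t := if r = "Platinum 3" then 1790 + o else t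
  let t := if r = "Platinum 4" then 1685 + o else t
  let t := if r = "Gold 1" then 1580 + o else t
  let t := if r = "Gold 2" then 1475 + o else t
  let t := if r = "Gold 3" then 1370 + o else t
  let t := if r = "Gold 4" then 1265 + o else t
  let t := if r = "Silver 1" then 1160 + o else t
  let t := if r = "Silver 2" then 1055 + o else t
  let t := if r = "Silver 3" then 950 + o else t
  let t := if r = "Silver 4" then 845 + o else t
  let t := if r = "Bronze 1" then 740 + o else t
  let t := if r = "Bronze 2" then 635 + o else t
  let t := if r = "Bronze 3" then 530 + o else t
  let t := if r = "Bronze 4" then 425 + o else t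
  let t := if r = "Iron 1" then 320 + o else t
  let t := if r = "Iron 2" then 215 + o else t
  let t := if r = "Iron 3" then 110 + o else t
  let t := if r = "Iron 4" then 5 + o else t
  t

def numerical_ranks (players : List (String × String × Int)) : List (String × Int) :=
  (players.foldl (fun d p => d.insert p.1 (pvRankA p.2.1 p.2.2))
    (PySem.Dict.empty : PySem.Dict String Int)).items

-- ===== PORT B =====
-- the module-level _TIERS / _APEX lists of Source B
def pvTiers : List String := ["Iron", "Bronze", "Silver", "Gold", "Platinum", "Diamond"]
def pvApex : List String := ["Master", "Grandmaster", "Challenger"]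

-- Source B's per-player body: parse "Tier d" and compute 5 + 105*(4*tier_index + (4-d)) + off
def pvRankB (label : String) (off : Int) : Int :=
  if 2 ≤ PySem.Str.len label ∧ PySem.Str.pyGet? label (-2) = some ' '
      ∧ PySem.Str.pyGet? label (-1) ∈ [some '1', some '2', some '3', some '4'] then
    let tier := PySem.Str.slice label none (some (-2))
    let d : Int := (((PySem.Str.pyGet? label (-1)).getD ' ').toNat : Int) - 48
    if tier ∈ pvTiers then
      5 + 105 * (4 * (((PySem.List.index? pvTiers tier).getD 0 : Nat) : Int) + (4 - d)) + off
    else if d = 1 ∧ tier ∈ pvApex then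
      2525 + off
    else 0
  else 0

def numerical_ranks_alt (players : List (String × String × Int)) : List (String × Int) :=
  (players.foldl (fun d p => d.insert p.1 (pvRankB p.2.1 p.2.2))
    (PySem.Dict.empty : PySem.Dict String Int)).items

-- ===== PRECONDITION & SPEC =====
def Spec_numerical_ranks (players : List (String × String × Int)) (out : List (String × Int)) : Prop := out = numerical_ranks_alt players
instance (players : List (String × String × Int)) (out : List (String × Int)) : Decidable (Spec_numerical_ranks players out) := by unfold Spec_numerical_ranks; infer_instance

-- ===== CLAIM (what is proved, stated in full; the proofs are below) =====
def Claim_equal_numerical_ranks : Prop := ∀ (players : List (String × String × Int)), Dom_numerical_ranks players → Spec_numerical_ranks players (numerical_ranks players)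

-- ===== LEMMAS AND PROOFS =====

-- the 27 rank labels A recognises
def pvLabels : List String := ["Challenger 1", "Grandmaster 1", "Master 1",
  "Diamond 1", "Diamond 2", "Diamond 3", "Diamond 4",
  "Platinum 1", "Platinum 2", "Platinum 3", "Platinum 4",
  "Gold 1", "Gold 2", "Gold 3", "Gold 4",
  "Silver 1", "Silver 2", "Silver 3", "Silver 4",
  "Bronze 1", "Bronze 2", "Bronze 3", "Bronze 4",
  "Iron 1", "Iron 2", "Iron 3", "Iron 4"]

theorem pvRankB_unfold (label : String) (off : Int) :
    pvRankB label off =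
      if 2 ≤ PySem.Str.len label ∧ PySem.Str.pyGet? label (-2) = some ' '
          ∧ PySem.Str.pyGet? label (-1) ∈ [some '1', some '2', some '3', some '4'] then
        (if PySem.Str.slice label none (some (-2)) ∈ pvTiers then
          5 + 105 * (4 * (((PySem.List.index? pvTiers (PySem.Str.slice label none (some (-2)))).getD 0 : Nat) : Int)
            + (4 - ((((PySem.Str.pyGet? label (-1)).getD ' ').toNat : Int) - 48))) + off
        else if (((PySem.Str.pyGet? label (-1)).getD ' ').toNat : Int) - 48 = 1
            ∧ PySem.Str.slice label none (some (-2)) ∈ pvApex then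
          2525 + off
        else 0)
      else 0 := rfl

-- a list of length ≥ 2 is its first part plus its last two elements
theorem pv_decomp (l : List Char) (h : 2 ≤ l.length) :
    l = l.take (l.length - 2) ++ [l[l.length - 2]'(by omega), l[l.length - 1]'(by omega)] := by
  conv_lhs => rw [← List.take_append_drop (l.length - 2) l]
  congr 1
  rw [List.drop_eq_getElem_cons (by omega)]
  congr 1
  have e : l.length - 2 + 1 = l.length - 1 := by omega
  rw [e, List.drop_eq_getElem_cons (by omega)]
  have e2 : l.length - 1 + 1 = l.length := by omega
  rw [e2, List.drop_length]

theorem pv_pyGet_neg2 (l : List Char) (h : 2 ≤ l.length) :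
    PySem.List.pyGet? l (-2) = some (l[l.length - 2]'(by omega)) := by
  simp only [PySem.List.pyGet?, PySem.List.pyIdx?]
  rw [if_neg (by omega), if_pos (by omega)]
  have e : l.length - (-(-2 : Int)).toNat = l.length - 2 := by omega
  simp only [Option.bind_some, e]
  exact List.getElem?_eq_getElem (by omega)

theorem pv_pyGet_neg1 (l : List Char) (h : 2 ≤ l.length) :
    PySem.List.pyGet? l (-1) = some (l[l.length - 1]'(by omega)) := by
  simp only [PySem.List.pyGet?, PySem.List.pyIdx?]
  rw [if_neg (by omega), if_pos (by omega)]
  have e : l.length - (-(-1 : Int)).toNat = l.length - 1 := by omega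
  simp only [Option.bind_some, e]
  exact List.getElem?_eq_getElem (by omega)

theorem pv_slice_neg2 (l : List Char) (h : 2 ≤ l.length) :
    PySem.List.slice l none (some (-2)) = l.take (l.length - 2) := by
  simp only [PySem.List.slice, PySem.List.clampIdx]
  rw [if_pos (by omega), if_neg (by omega)]
  simp only [Nat.sub_zero, List.drop_zero]
  congr 1
  omega

theorem pv_mem_labels (t : String) (c : Char)
    (h : (t ∈ pvTiers ∧ c ∈ ['1', '2', '3', '4']) ∨ (t ∈ pvApex ∧ c = '1')) :
    t ++ " " ++ String.singleton c ∈ pvLabels := by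
  rcases h with ⟨ht, hc⟩ | ⟨ht, rfl⟩
  · fin_cases ht <;> fin_cases hc <;> decide
  · fin_cases ht <;> decide

theorem pvRankA_eq_B (r : String) (o : Int) : pvRankA r o = pvRankB r o := by
  by_cases h0 : r = "Challenger 1"
  · subst h0; rfl
  by_cases h1 : r = "Grandmaster 1"
  · subst h1; rfl
  by_cases h2 : r = "Master 1"
  · subst h2; rfl
  by_cases h3 : r = "Diamond 1"
  · subst h3; rfl
  by_cases h4 : r = "Diamond 2"
  · subst h4; rfl
  by_cases h5 : r = "Diamond 3"
  · subst h5; rfl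
  by_cases h6 : r = "Diamond 4"
  · subst h6; rfl
  by_cases h7 : r = "Platinum 1"
  · subst h7; rfl
  by_cases h8 : r = "Platinum 2"
  · subst h8; rfl
  by_cases h9 : r = "Platinum 3"
  · subst h9; rfl
  by_cases h10 : r = "Platinum 4"
  · subst h10; rfl
  by_cases h11 : r = "Gold 1"
  · subst h11; rfl
  by_cases h12 : r = "Gold 2"
  · subst h12; rfl
  by_cases h13 : r = "Gold 3"
  · subst h13; rfl
  by_cases h14 : r = "Gold 4"
  · subst h14; rfl
  by_cases h15 : r = "Silver 1"
  · subst h15; rfl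
  by_cases h16 : r = "Silver 2"
  · subst h16; rfl
  by_cases h17 : r = "Silver 3"
  · subst h17; rfl
  by_cases h18 : r = "Silver 4"
  · subst h18; rfl
  by_cases h19 : r = "Bronze 1"
  · subst h19; rfl
  by_cases h20 : r = "Bronze 2"
  · subst h20; rfl
  by_cases h21 : r = "Bronze 3"
  · subst h21; rfl
  by_cases h22 : r = "Bronze 4"
  · subst h22; rfl
  by_cases h23 : r = "Iron 1"
  · subst h23; rfl
  by_cases h24 : r = "Iron 2"
  · subst h24; rfl
  by_cases h25 : r = "Iron 3"
  · subst h25; rfl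
  by_cases h26 : r = "Iron 4"
  · subst h26; rfl
  -- miss case: A returns 0
  have hne : ∀ s ∈ pvLabels, r ≠ s := by
    intro s hs
    fin_cases hs <;> assumption
  have hA : pvRankA r o = 0 := by
    simp [pvRankA, h0, h1, h2, h3, h4, h5, h6, h7, h8, h9, h10, h11, h12, h13, h14,
      h15, h16, h17, h18, h19, h20, h21, h22, h23, h24, h25, h26]
  rw [hA, pvRankB_unfold]
  by_cases hg : 2 ≤ PySem.Str.len r ∧ PySem.Str.pyGet? r (-2) = some ' '
      ∧ PySem.Str.pyGet? r (-1) ∈ [some '1', some '2', some '3', some '4']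
  · obtain ⟨hlen, hsp, hd⟩ := hg
    have hlen2 : 2 ≤ r.toList.length := by
      simp only [PySem.Str.len] at hlen
      omega
    have e2 : PySem.Str.pyGet? r (-2) = some (r.toList[r.toList.length - 2]'(by omega)) := by
      simp only [PySem.Str.pyGet?, PySem.Chars.pyGet?_eq_listPyGet?]
      exact pv_pyGet_neg2 _ hlen2
    have e1 : PySem.Str.pyGet? r (-1) = some (r.toList[r.toList.length - 1]'(by omega)) := by
      simp only [PySem.Str.pyGet?, PySem.Chars.pyGet?_eq_listPyGet?]
      exact pv_pyGet_neg1 _ hlen2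
    have hc2 : r.toList[r.toList.length - 2]'(by omega) = ' ' :=
      Option.some.inj (e2.symm.trans hsp)
    have hcmem : r.toList[r.toList.length - 1]'(by omega) ∈ ['1', '2', '3', '4'] := by
      rw [e1] at hd
      simpa using hd
    have hslice : (PySem.Str.slice r none (some (-2))).toList = r.toList.take (r.toList.length - 2) := by
      simp only [PySem.Str.slice, PySem.Chars.slice_eq_listSlice]
      rw [pv_slice_neg2 _ hlen2]
      simp
    have hr' : r = PySem.Str.slice r none (some (-2)) ++ " "
        ++ String.singleton (r.toList[r.toList.length - 1]'(by omega)) := by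
      apply String.toList_inj.mp
      simp only [String.toList_append, hslice]
      conv_lhs => rw [pv_decomp r.toList hlen2]
      rw [hc2]
      simp [String.singleton]
    rw [if_pos ⟨hlen, hsp, hd⟩]
    by_cases ht : PySem.Str.slice r none (some (-2)) ∈ pvTiers
    · exact absurd hr' (hne _ (pv_mem_labels _ _ (Or.inl ⟨ht, hcmem⟩)))
    · rw [if_neg ht]
      by_cases hap : (((PySem.Str.pyGet? r (-1)).getD ' ').toNat : Int) - 48 = 1
          ∧ PySem.Str.slice r none (some (-2)) ∈ pvApex
      · exfalso
        obtain ⟨hd1, hap⟩ := hap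
        rw [e1] at hd1
        have hcmem' : r.toList[r.toList.length - 1]'(by omega) = '1'
            ∨ r.toList[r.toList.length - 1]'(by omega) = '2'
            ∨ r.toList[r.toList.length - 1]'(by omega) = '3'
            ∨ r.toList[r.toList.length - 1]'(by omega) = '4' := by
          simpa using hcmem
        have hcval : r.toList[r.toList.length - 1]'(by omega) = '1' := by
          simp only [Option.getD_some] at hd1
          rcases hcmem' with hc | hc | hc | hc
          · exact hc
          all_goals (exfalso; rw [hc] at hd1; revert hd1; decide)
        rw [hcval] at hr'
        exact absurd hr' (hne _ (pv_mem_labels _ _ (Or.inr ⟨hap, rfl⟩)))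
      · rw [if_neg hap]
  · rw [if_neg hg]

-- ===== VERDICT (by name: the statement is the Claim_ definition above) =====
theorem numerical_ranks_spec : Claim_equal_numerical_ranks := by
  intro players _
  show numerical_ranks players = numerical_ranks_alt players
  unfold numerical_ranks numerical_ranks_alt
  have hf : (fun (d : PySem.Dict String Int) (p : String × String × Int) =>
        d.insert p.1 (pvRankA p.2.1 p.2.2))
      = (fun (d : PySem.Dict String Int) (p : String × String × Int) =>
        d.insert p.1 (pvRankB p.2.1 p.2.2)) := by
    funext d p
    rw [pvRankA_eq_B]
  rw [hf]
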